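-- pv_equiv track=rewrite | github.com/raj713335/LeetCode | Easy/1385 Find the Distance Value Between Two Arrays.py | findTheDistanceValue
-- ===== SOURCE A (Python) =====
-- from typing import List
--
-- def findTheDistanceValue(arr1: List[int], arr2: List[int], d: int) -> int:
--
--     n1,n2,c = len(arr1),len(arr2),0
--     for i in range(n1):
--         c1=0
--         for j in range(n2):
--             if abs(arr1[i]-arr2[j])>d:
--                 c1+=1
--             else:
--                 break
--         if c1==n2:
--             c+=1
--     return c
-- ===== SOURCE B (Python) =====
-- from typing import List
--
-- def findTheDistanceValue(arr1: List[int], arr2: List[int], d: int) -> int: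
--     a = sorted(arr2)
--     n = len(a)
--
--     def lower(t):  # number of elements of a that are < t
--         lo, hi = 0, n
--         while lo < hi:
--             mid = (lo + hi) // 2
--             if a[mid] < t:
--                 lo = mid + 1
--             else:
--                 hi = mid
--         return lo
--
--     c = 0
--     for x in arr1:
--         if lower(x + d + 1) <= lower(x - d):
--             c += 1
--     return c
-- ===== Notes on version B (the rewrite author's own statement) =====
-- stated objective: faster
-- what changed: B sorts arr2 once and, for each element of arr1, binary-searches (hand-written lower-bound search) whether any arr2 element lies in [x-d, x+d], replacing A's per-element linear scan with break.
import Mathlib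
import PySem

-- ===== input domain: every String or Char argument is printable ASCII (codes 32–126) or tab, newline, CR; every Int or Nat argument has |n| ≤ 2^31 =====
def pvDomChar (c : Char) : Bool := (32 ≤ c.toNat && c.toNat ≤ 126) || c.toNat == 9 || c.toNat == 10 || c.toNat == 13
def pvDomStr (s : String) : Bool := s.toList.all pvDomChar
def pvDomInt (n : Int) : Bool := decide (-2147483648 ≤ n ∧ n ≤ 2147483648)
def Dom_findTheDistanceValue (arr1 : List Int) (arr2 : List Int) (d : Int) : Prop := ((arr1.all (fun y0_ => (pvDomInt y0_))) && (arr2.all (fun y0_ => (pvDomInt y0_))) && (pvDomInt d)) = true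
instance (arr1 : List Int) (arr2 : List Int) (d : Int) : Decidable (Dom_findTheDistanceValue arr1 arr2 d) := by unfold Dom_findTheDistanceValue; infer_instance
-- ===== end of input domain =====

-- B replaces A's quadratic inner scan by sorting arr2 once and binary-searching
-- the interval [x-d, x+d] for each x in arr1 (objective: faster, asymptotic).

-- ===== PORT A =====
-- A's inner loop over arr2 with break: counts the prefix of arr2 with |x - y| > d
def pvInnerA (x : Int) (d : Int) : List Int → Nat
  | [] => 0
  | y :: ys => if d < |x - y| then pvInnerA x d ys + 1 else 0

def findTheDistanceValue (arr1 : List Int) (arr2 : List Int) (d : Int) : Int :=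
  arr1.foldl (fun c x => if pvInnerA x d arr2 = arr2.length then c + 1 else c) 0

-- ===== PORT B =====
-- B's hand-written binary search: number of elements of a[lo:hi] that are < t, plus lo
def pvLower (a : List Int) (t : Int) (lo hi : Nat) : Nat :=
  if _h : lo < hi then
    let mid := (lo + hi) / 2
    if a.getD mid 0 < t then pvLower a t (mid + 1) hi else pvLower a t lo mid
  else lo
termination_by hi - lo
decreasing_by all_goals omega

def findTheDistanceValue_alt (arr1 : List Int) (arr2 : List Int) (d : Int) : Int :=
  let a := PySem.List.sorted arr2 (fun y => y) false
  let n := a.length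
  arr1.foldl (fun c x =>
    if pvLower a (x + d + 1) 0 n ≤ pvLower a (x - d) 0 n then c + 1 else c) 0

-- ===== PRECONDITION & SPEC =====
def Spec_findTheDistanceValue (arr1 : List Int) (arr2 : List Int) (d : Int) (out : Int) : Prop := out = findTheDistanceValue_alt arr1 arr2 d
instance (arr1 : List Int) (arr2 : List Int) (d : Int) (out : Int) : Decidable (Spec_findTheDistanceValue arr1 arr2 d out) := by unfold Spec_findTheDistanceValue; infer_instance

-- ===== CLAIM (what is proved, stated in full; the proofs are below) =====
def Claim_equal_findTheDistanceValue : Prop := ∀ (arr1 : List Int) (arr2 : List Int) (d : Int), Dom_findTheDistanceValue arr1 arr2 d → Spec_findTheDistanceValue arr1 arr2 d (findTheDistanceValue arr1 arr2 d)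

-- ===== LEMMAS AND PROOFS =====

-- A-side: the break-loop counts the whole list iff every element is far
theorem pvInnerA_eq_length_iff (x d : Int) (l : List Int) :
    pvInnerA x d l = l.length ↔ ∀ y ∈ l, d < |x - y| := by
  induction l with
  | nil => simp [pvInnerA]
  | cons y ys ih =>
    simp only [pvInnerA, List.length_cons, List.mem_cons, forall_eq_or_imp]
    split_ifs with h
    · rw [Nat.add_right_cancel_iff, ih]
      simp [h]
    · simp [h]

-- B-side: binary search on a sorted list computes countP (· < t)
theorem pvLower_count (a : List Int) (t : Int)
    (hs : a.Pairwise (· ≤ ·)) :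
    ∀ lo hi, hi ≤ a.length → lo ≤ hi →
      (∀ i, i < lo → a.getD i 0 < t) →
      (∀ i, hi ≤ i → i < a.length → ¬ a.getD i 0 < t) →
      pvLower a t lo hi = a.countP (fun y => decide (y < t)) := by
  have hmono : ∀ i j, i ≤ j → j < a.length → a.getD i 0 ≤ a.getD j 0 := by
    intro i j hij hj
    rcases Nat.lt_or_ge i j with hlt | hge
    · have h2 := (List.pairwise_iff_getElem.mp hs) i j (by omega) hj hlt
      rw [List.getD_eq_getElem a 0 (by omega), List.getD_eq_getElem a 0 hj]
      exact h2
    · have : i = j := by omega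
      subst this; exact le_refl _
  intro lo hi
  induction lo, hi using pvLower.induct a t with
  | case1 lo hi h mid hm ih =>
    intro hhi hlohi hlow hhigh
    have hmideq : mid = (lo + hi) / 2 := rfl
    rw [pvLower, dif_pos h]
    show (if a.getD mid 0 < t
          then pvLower a t (mid + 1) hi
          else pvLower a t lo mid) = _
    rw [if_pos hm]
    exact ih hhi (by omega)
      (by intro i hi2
          have hmid : mid < a.length := by omega
          exact lt_of_le_of_lt (hmono i mid (by omega) hmid) hm)
      hhigh
  | case2 lo hi h mid hm ih =>
    intro hhi hlohi hlow hhigh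
    have hmideq : mid = (lo + hi) / 2 := rfl
    rw [pvLower, dif_pos h]
    show (if a.getD mid 0 < t
          then pvLower a t (mid + 1) hi
          else pvLower a t lo mid) = _
    rw [if_neg hm]
    exact ih (by omega) (by omega) hlow
      (by intro i hi2 hi3
          exact fun hc => hm (lt_of_le_of_lt (hmono mid i hi2 hi3) hc))
  | case3 lo hi h =>
    intro hhi hlohi hlow hhigh
    have hle : lo = hi := by omega
    subst hle
    rw [pvLower, dif_neg h]
    -- every index < lo satisfies (< t), every index ≥ lo fails it
    have hsplit : a = a.take lo ++ a.drop lo := (List.take_append_drop lo a).symm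
    rw [hsplit, List.countP_append]
    have h1 : (a.take lo).countP (fun y => decide (y < t)) = (a.take lo).length := by
      rw [List.countP_eq_length]
      intro y hy
      rcases List.mem_iff_getElem.mp hy with ⟨i, hil, he⟩
      have hil' : i < lo := by
        have := hil; rw [List.length_take] at this; omega
      have : a.getD i 0 < t := hlow i hil'
      rw [List.getD_eq_getElem a 0 (by omega), ← List.getElem_take (h := hil)] at this
      rw [← he]
      simpa using this
    have h2 : (a.drop lo).countP (fun y => decide (y < t)) = 0 := by
      rw [List.countP_eq_zero]
      intro y hy
      rcases List.mem_iff_getElem.mp hy with ⟨i, hil, he⟩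
      have hil' : lo + i < a.length := by
        have := hil; rw [List.length_drop] at this; omega
      have hno : ¬ a.getD (lo + i) 0 < t := hhigh (lo + i) (by omega) hil'
      rw [List.getD_eq_getElem a 0 hil'] at hno
      rw [← he, List.getElem_drop]
      simpa using hno
    rw [h1, h2, List.length_take]
    omega

theorem pvLower_count' (a : List Int) (t : Int) (hs : a.Pairwise (· ≤ ·)) :
    pvLower a t 0 a.length = a.countP (fun y => decide (y < t)) :=
  pvLower_count a t hs 0 a.length (le_refl _) (Nat.zero_le _)
    (by omega) (by intro i h1 h2; omega)

-- strict count comparison from one witness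
theorem countP_lt_of_exists (p q : Int → Bool)
    (l : List Int) (hpq : ∀ y ∈ l, p y = true → q y = true)
    (hex : ∃ y ∈ l, q y = true ∧ p y = false) :
    l.countP p < l.countP q := by
  induction l with
  | nil => simp at hex
  | cons z zs ih =>
    have hmono := List.countP_mono_left (l := zs) (p := p) (q := q)
      (fun y hy hpy => hpq y (List.mem_cons_of_mem _ hy) hpy)
    rcases hex with ⟨y, hy, hqy, hpy⟩
    rcases List.mem_cons.mp hy with rfl | hy'
    · rw [List.countP_cons, List.countP_cons]
      simp [hpy, hqy]
      omega
    · have hrec := ih (fun w hw => hpq w (List.mem_cons_of_mem _ hw)) ⟨y, hy', hqy, hpy⟩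
      rw [List.countP_cons, List.countP_cons]
      have h1 : (if p z = true then 1 else 0) ≤ (if q z = true then 1 else 0) := by
        by_cases hp : p z = true
        · simp [hp, hpq z (List.mem_cons_self) hp]
        · simp [hp]
      omega

-- the count comparison holds iff no element lies within distance d of x
theorem countP_cond_iff (l : List Int) (x d : Int) :
    (l.countP (fun y => decide (y < x + d + 1)) ≤ l.countP (fun y => decide (y < x - d)))
      ↔ ∀ y ∈ l, d < |x - y| := by
  by_cases hd : d < 0
  · constructor
    · intro _ y _; have : 0 ≤ |x - y| := abs_nonneg _; omega
    · intro _
      exact List.countP_mono_left (by intro y _ h; simp at h ⊢; omega)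
  · constructor
    · intro hle y hy
      by_contra hfar
      have hin : x - d ≤ y ∧ y ≤ x + d := by
        rcases abs_cases (x - y) with ⟨he, _⟩ | ⟨he, _⟩ <;> omega
      have := countP_lt_of_exists (fun y => decide (y < x - d))
        (fun y => decide (y < x + d + 1)) l
        (by intro z _ h; simp at h ⊢; omega)
        ⟨y, hy, by simp; omega, by simp; omega⟩
      omega
    · intro hall
      apply List.countP_mono_left
      intro y hy h
      have := hall y hy
      rcases abs_cases (x - y) with ⟨he, _⟩ | ⟨he, _⟩ <;> simp at h ⊢ <;> omega

-- the per-element conditions of the two folds coincide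
theorem step_cond_eq (arr2 : List Int) (d x : Int) :
    (pvInnerA x d arr2 = arr2.length) ↔
      (pvLower (PySem.List.sorted arr2 (fun y => y) false) (x + d + 1) 0
          (PySem.List.sorted arr2 (fun y => y) false).length ≤
        pvLower (PySem.List.sorted arr2 (fun y => y) false) (x - d) 0
          (PySem.List.sorted arr2 (fun y => y) false).length) := by
  have hs : (PySem.List.sorted arr2 (fun y => y) false).Pairwise (· ≤ ·) := by
    have := PySem.List.sorted_pairwise (xs := arr2) (key := fun y => y)
    simpa using this
  rw [pvLower_count' _ _ hs, pvLower_count' _ _ hs, pvInnerA_eq_length_iff,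
    countP_cond_iff]
  constructor
  · intro h y hy
    exact h y ((PySem.List.mem_sorted _ _ _ _).mp hy)
  · intro h y hy
    exact h y ((PySem.List.mem_sorted _ _ _ _).mpr hy)

-- ===== VERDICT (by name: the statement is the Claim_ definition above) =====
theorem findTheDistanceValue_spec : Claim_equal_findTheDistanceValue := by
  intro arr1 arr2 d hdom
  clear hdom
  unfold Spec_findTheDistanceValue findTheDistanceValue findTheDistanceValue_alt
  induction arr1 using List.reverseRecOn with
  | nil => rfl
  | append_singleton xs x ih =>
    rw [List.foldl_append, List.foldl_append, ih]
    simp only [List.foldl_cons, List.foldl_nil]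
    by_cases h : pvInnerA x d arr2 = arr2.length
    · rw [if_pos h, if_pos ((step_cond_eq arr2 d x).mp h)]
    · rw [if_neg h, if_neg (fun hc => h ((step_cond_eq arr2 d x).mpr hc))]
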